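-- pv_equiv track=rewrite | github.com/griff4692/axolotl-bhc | scripts/sent_inference_utils.py | remove_non_ents_from_list
-- ===== SOURCE A (Python) =====
-- import string
--
-- def remove_non_ents_from_list(text, rel_spans, remove_title=True):
--     rel_spans_lower = [x.strip(string.punctuation).lower() for x in list(rel_spans)]
--     lines = text.split('\n')
--     new_lines = []
--     for line in lines:
--         if 'title:' in line.lower() or '<doc-sep>' in line.lower():
--             if not remove_title:
--                 new_lines.append(line)
--         elif line == '':
--             new_lines.append(line)
--         elif any([x_lower in line.lower() for x_lower in rel_spans_lower]):
--             new_lines.append(line)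
--     return '\n'.join(new_lines)
-- ===== SOURCE B (Python) =====
-- import string
--
-- def remove_non_ents_from_list(text, rel_spans, remove_title=True):
--     # span-major pass: classify each line once (title/doc-sep, empty, or pending),
--     # then sweep the spans over the still-pending lines, lowering each line only once
--     rows = []
--     for ln in text.split('\n'):
--         low = ln.lower()
--         if 'title:' in low or '<doc-sep>' in low:
--             st = not remove_title
--         elif ln == '':
--             st = True
--         else:
--             st = None
--         rows.append((ln, low, st))
--     for sp in rel_spans:
--         p = sp.strip(string.punctuation).lower()
--         rows = [(ln, low, True if st is None and p in low else st)
--                 for (ln, low, st) in rows]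
--     return '\n'.join(ln for (ln, low, st) in rows if st is True)
-- ===== Notes on version B (the rewrite author's own statement) =====
-- stated objective: faster
-- what changed: Line-major loop with an inner any() over all spans replaced by a two-phase span-major sweep: lines are classified once (title/doc-sep, empty, pending) with each line lowered exactly once, then each span is swept over only the still-pending lines.
import Mathlib
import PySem

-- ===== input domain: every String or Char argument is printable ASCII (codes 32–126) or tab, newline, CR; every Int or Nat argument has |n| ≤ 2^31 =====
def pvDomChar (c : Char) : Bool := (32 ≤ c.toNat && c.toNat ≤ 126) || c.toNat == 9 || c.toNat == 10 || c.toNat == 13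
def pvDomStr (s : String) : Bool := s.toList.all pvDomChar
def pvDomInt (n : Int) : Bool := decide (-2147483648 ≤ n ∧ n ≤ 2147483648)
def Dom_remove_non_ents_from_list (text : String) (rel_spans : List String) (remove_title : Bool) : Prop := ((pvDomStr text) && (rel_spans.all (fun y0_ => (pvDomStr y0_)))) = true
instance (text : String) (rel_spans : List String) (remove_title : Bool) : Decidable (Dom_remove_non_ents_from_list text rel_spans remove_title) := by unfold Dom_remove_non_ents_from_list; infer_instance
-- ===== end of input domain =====

-- B replaces A's line-major loop (inner any() over all spans, re-lowering the line each test)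
-- by a span-major sweep over once-classified, once-lowered lines; measured constant-factor faster.

-- string.punctuation
def pvPunct : String := "!\"#$%&'()*+,-./:;<=>?@[\\]^_`{|}~"

-- ===== PORT A =====
def remove_non_ents_from_list (text : String) (rel_spans : List String) (remove_title : Bool) : String :=
  let rel_spans_lower := rel_spans.map (fun x => PySem.Str.lower (PySem.Str.stripChars x pvPunct))
  let lines := (PySem.Str.split? text "\n").getD []   -- sep "\n" ≠ "", so split? is always some
  let new_lines := lines.foldl (fun acc line =>
    if PySem.Str.isIn "title:" (PySem.Str.lower line) || PySem.Str.isIn "<doc-sep>" (PySem.Str.lower line) then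
      (if !remove_title then acc ++ [line] else acc)
    else if line == "" then acc ++ [line]
    else if (rel_spans_lower.map (fun x_lower => PySem.Str.isIn x_lower (PySem.Str.lower line))).any id then
      acc ++ [line]
    else acc) []
  PySem.Str.join "\n" new_lines

-- ===== PORT B =====
-- classify one line, pairing it with its (once-computed) lowering:
-- some b = decided keep/drop, none = pending (waits for a span match)
def pvClassify (remove_title : Bool) (ln : String) : String × String × Option Bool :=
  (ln, PySem.Str.lower ln,
    if PySem.Str.isIn "title:" (PySem.Str.lower ln) || PySem.Str.isIn "<doc-sep>" (PySem.Str.lower ln) then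
      some (!remove_title)
    else if ln == "" then some true
    else none)

-- one span over one row: a pending row is kept iff the span occurs in its lowered line
def pvSweep (p : String) (r : String × String × Option Bool) : String × String × Option Bool :=
  (r.1, r.2.1, match r.2.2 with
    | none => if PySem.Str.isIn p r.2.1 then some true else none
    | some b => some b)

def remove_non_ents_from_list_alt (text : String) (rel_spans : List String) (remove_title : Bool) : String :=
  let rows := ((PySem.Str.split? text "\n").getD []).map (pvClassify remove_title)
  let rows := rel_spans.foldl (fun rs sp =>
    rs.map (pvSweep (PySem.Str.lower (PySem.Str.stripChars sp pvPunct)))) rows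
  PySem.Str.join "\n" (rows.filterMap (fun r => if r.2.2 == some true then some r.1 else none))

-- ===== PRECONDITION & SPEC =====
def Spec_remove_non_ents_from_list (text : String) (rel_spans : List String) (remove_title : Bool) (out : String) : Prop := out = remove_non_ents_from_list_alt text rel_spans remove_title
instance (text : String) (rel_spans : List String) (remove_title : Bool) (out : String) : Decidable (Spec_remove_non_ents_from_list text rel_spans remove_title out) := by unfold Spec_remove_non_ents_from_list; infer_instance

-- ===== CLAIM (what is proved, stated in full; the proofs are below) =====
def Claim_equal_remove_non_ents_from_list : Prop := ∀ (text : String) (rel_spans : List String) (remove_title : Bool), Dom_remove_non_ents_from_list text rel_spans remove_title → Spec_remove_non_ents_from_list text rel_spans remove_title (remove_non_ents_from_list text rel_spans remove_title)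

-- ===== LEMMAS AND PROOFS =====

-- the per-line keep condition both programs implement
def pvKeep (rel_spans : List String) (remove_title : Bool) (line : String) : Bool :=
  if PySem.Str.isIn "title:" (PySem.Str.lower line) || PySem.Str.isIn "<doc-sep>" (PySem.Str.lower line) then
    !remove_title
  else if line == "" then true
  else rel_spans.any (fun sp => PySem.Str.isIn (PySem.Str.lower (PySem.Str.stripChars sp pvPunct)) (PySem.Str.lower line))

-- one step of A's loop appends iff pvKeep
theorem pvStepA (rel_spans : List String) (remove_title : Bool) (acc : List String) (line : String) :
    (if PySem.Str.isIn "title:" (PySem.Str.lower line) || PySem.Str.isIn "<doc-sep>" (PySem.Str.lower line) then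
      (if !remove_title then acc ++ [line] else acc)
    else if line == "" then acc ++ [line]
    else if ((rel_spans.map (fun x => PySem.Str.lower (PySem.Str.stripChars x pvPunct))).map
               (fun x_lower => PySem.Str.isIn x_lower (PySem.Str.lower line))).any id then acc ++ [line]
    else acc)
    = if pvKeep rel_spans remove_title line then acc ++ [line] else acc := by
  unfold pvKeep
  simp only [List.any_map, Function.comp_def, id_eq]
  by_cases h1 : (PySem.Str.isIn "title:" (PySem.Str.lower line) || PySem.Str.isIn "<doc-sep>" (PySem.Str.lower line)) = true
  · simp only [h1, reduceIte]
  · simp only [Bool.not_eq_true] at h1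
    simp only [h1, Bool.false_eq_true, reduceIte]
    by_cases h2 : (line == "") = true
    · simp only [h2, reduceIte]
    · simp only [Bool.not_eq_true] at h2
      simp only [h2, Bool.false_eq_true, reduceIte]

-- A's loop is filtering by pvKeep
theorem pvA_foldl (rel_spans : List String) (remove_title : Bool) (lines acc : List String) :
    lines.foldl (fun acc line =>
      if PySem.Str.isIn "title:" (PySem.Str.lower line) || PySem.Str.isIn "<doc-sep>" (PySem.Str.lower line) then
        (if !remove_title then acc ++ [line] else acc)
      else if line == "" then acc ++ [line]
      else if ((rel_spans.map (fun x => PySem.Str.lower (PySem.Str.stripChars x pvPunct))).map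
                 (fun x_lower => PySem.Str.isIn x_lower (PySem.Str.lower line))).any id then acc ++ [line]
      else acc) acc
    = acc ++ lines.filter (pvKeep rel_spans remove_title) := by
  have hc := PySem.List.foldl_congr_mem lines
    (fun acc line =>
      if PySem.Str.isIn "title:" (PySem.Str.lower line) || PySem.Str.isIn "<doc-sep>" (PySem.Str.lower line) then
        (if !remove_title then acc ++ [line] else acc)
      else if line == "" then acc ++ [line]
      else if ((rel_spans.map (fun x => PySem.Str.lower (PySem.Str.stripChars x pvPunct))).map
                 (fun x_lower => PySem.Str.isIn x_lower (PySem.Str.lower line))).any id then acc ++ [line]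
      else acc)
    (fun acc line => if pvKeep rel_spans remove_title line then acc ++ [line] else acc) acc
    (fun acc line _ => pvStepA rel_spans remove_title acc line)
  rw [hc]
  have := PySem.List.foldl_append_if (pvKeep rel_spans remove_title) (fun x => x) lines acc
  simpa using this

-- folding maps commutes to a per-element fold
theorem pvFold_map {α β : Type} (f : β → α → α) (spans : List β) (rows : List α) :
    spans.foldl (fun rs sp => rs.map (f sp)) rows
    = rows.map (fun r => spans.foldl (fun r sp => f sp r) r) := by
  induction spans generalizing rows with
  | nil => simp
  | cons hd tl ih => rw [List.foldl_cons, ih, List.map_map]; rfl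

-- the span sweep on one row: components 1,2 fixed; pending is kept iff some span matches
theorem pvSweep_fold (spans : List String) (ln low : String) (st : Option Bool) :
    spans.foldl (fun r sp => pvSweep (PySem.Str.lower (PySem.Str.stripChars sp pvPunct)) r) (ln, low, st)
    = (ln, low,
       match st with
       | some b => some b
       | none => if spans.any (fun sp => PySem.Str.isIn (PySem.Str.lower (PySem.Str.stripChars sp pvPunct)) low) then some true else none) := by
  induction spans generalizing st with
  | nil => cases st <;> rfl
  | cons hd tl ih =>
    rw [List.foldl_cons]
    cases st with
    | some b => rw [show pvSweep (PySem.Str.lower (PySem.Str.stripChars hd pvPunct)) (ln, low, some b) = (ln, low, some b) from rfl, ih]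
    | none =>
      by_cases h : PySem.Str.isIn (PySem.Str.lower (PySem.Str.stripChars hd pvPunct)) low = true
      · rw [show pvSweep (PySem.Str.lower (PySem.Str.stripChars hd pvPunct)) (ln, low, none) = (ln, low, if PySem.Str.isIn (PySem.Str.lower (PySem.Str.stripChars hd pvPunct)) low then some true else none) from rfl]
        simp only [h, reduceIte, ih, List.any_cons, Bool.true_or]
      · simp only [Bool.not_eq_true] at h
        rw [show pvSweep (PySem.Str.lower (PySem.Str.stripChars hd pvPunct)) (ln, low, none) = (ln, low, if PySem.Str.isIn (PySem.Str.lower (PySem.Str.stripChars hd pvPunct)) low then some true else none) from rfl]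
        simp only [h, Bool.false_eq_true, reduceIte, ih, List.any_cons, Bool.false_or]

-- B's final state on a line decides exactly pvKeep
theorem pvFinal_eq (rel_spans : List String) (remove_title : Bool) (ln : String) :
    ((rel_spans.foldl (fun r sp => pvSweep (PySem.Str.lower (PySem.Str.stripChars sp pvPunct)) r)
        (pvClassify remove_title ln)).2.2 == some true) = pvKeep rel_spans remove_title ln := by
  unfold pvClassify pvKeep
  by_cases h1 : (PySem.Str.isIn "title:" (PySem.Str.lower ln) || PySem.Str.isIn "<doc-sep>" (PySem.Str.lower ln)) = true
  · simp only [h1, reduceIte, pvSweep_fold]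
    cases remove_title <;> rfl
  · simp only [Bool.not_eq_true] at h1
    simp only [h1, Bool.false_eq_true, reduceIte]
    by_cases h2 : (ln == "") = true
    · simp only [h2, reduceIte, pvSweep_fold]; rfl
    · simp only [Bool.not_eq_true] at h2
      simp only [h2, Bool.false_eq_true, reduceIte, pvSweep_fold]
      by_cases h3 : (rel_spans.any fun sp => PySem.Str.isIn (PySem.Str.lower (PySem.Str.stripChars sp pvPunct)) (PySem.Str.lower ln)) = true
      · simp only [h3, reduceIte]; rfl
      · simp only [Bool.not_eq_true] at h3
        simp only [h3, Bool.false_eq_true, reduceIte]; rfl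

-- first component survives the sweep
theorem pvFinal_fst (rel_spans : List String) (remove_title : Bool) (ln : String) :
    (rel_spans.foldl (fun r sp => pvSweep (PySem.Str.lower (PySem.Str.stripChars sp pvPunct)) r)
        (pvClassify remove_title ln)).1 = ln := by
  unfold pvClassify; rw [pvSweep_fold]

-- B's pipeline on the split lines is the same filter
theorem pvB_line (rel_spans : List String) (remove_title : Bool) (lines : List String) :
    ((rel_spans.foldl (fun rs sp =>
        rs.map (pvSweep (PySem.Str.lower (PySem.Str.stripChars sp pvPunct))))
        (lines.map (pvClassify remove_title))).filterMap
      (fun r => if r.2.2 == some true then some r.1 else none))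
    = lines.filter (pvKeep rel_spans remove_title) := by
  rw [pvFold_map, List.map_map]
  induction lines with
  | nil => rfl
  | cons hd tl ih =>
    rw [List.map_cons, List.filterMap_cons, List.filter_cons, ih]
    simp only [Function.comp_apply]
    rw [pvFinal_eq, pvFinal_fst]
    by_cases hk : pvKeep rel_spans remove_title hd = true
    · simp only [hk, reduceIte]
    · simp only [Bool.not_eq_true] at hk
      simp only [hk, Bool.false_eq_true, reduceIte]

-- ===== VERDICT (by name: the statement is the Claim_ definition above) =====
theorem remove_non_ents_from_list_spec : Claim_equal_remove_non_ents_from_list := by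
  intro text rel_spans remove_title _
  unfold Spec_remove_non_ents_from_list
  show remove_non_ents_from_list text rel_spans remove_title = remove_non_ents_from_list_alt text rel_spans remove_title
  simp only [remove_non_ents_from_list, remove_non_ents_from_list_alt]
  rw [pvA_foldl, pvB_line, List.nil_append]
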